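-- pv_equiv track=rewrite | github.com/chenpengcode/Leetcode | array/1030_allCellsDistOrder.py | allCellsDistOrder_2
-- ===== SOURCE A (Python) =====
-- import collections
-- from typing import List
--
-- def allCellsDistOrder_2(R: int, C: int, r0: int, c0: int) -> List[List[int]]:
--     maxDist = max(r0, R - 1 - r0) + max(c0, C - 1 - c0)
--     bucket = collections.defaultdict(list)
--     dist = lambda r1, c1, r2, c2: abs(r1 - r2) + abs(c1 - c2)
--
--     for i in range(R):
--         for j in range(C):
--             bucket[dist(i, j, r0, c0)].append([i, j])
--
--     ret = list()
--     for i in range(maxDist + 1):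
--         ret.extend(bucket[i])
--
--     return ret
-- ===== SOURCE B (Python) =====
-- from typing import List
--
-- def allCellsDistOrder_2(R: int, C: int, r0: int, c0: int) -> List[List[int]]:
--     cells = [[i, j] for i in range(R) for j in range(C)]
--     return sorted(cells, key=lambda c: abs(c[0] - r0) + abs(c[1] - c0))
-- ===== Notes on version B (the rewrite author's own statement) =====
-- stated objective: simpler
-- what changed: Replaces A's distance-bucket dict plus a scan over every distance value 0..maxDist by a single row-major comprehension followed by one stable sort on the Manhattan-distance key.
import Mathlib
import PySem

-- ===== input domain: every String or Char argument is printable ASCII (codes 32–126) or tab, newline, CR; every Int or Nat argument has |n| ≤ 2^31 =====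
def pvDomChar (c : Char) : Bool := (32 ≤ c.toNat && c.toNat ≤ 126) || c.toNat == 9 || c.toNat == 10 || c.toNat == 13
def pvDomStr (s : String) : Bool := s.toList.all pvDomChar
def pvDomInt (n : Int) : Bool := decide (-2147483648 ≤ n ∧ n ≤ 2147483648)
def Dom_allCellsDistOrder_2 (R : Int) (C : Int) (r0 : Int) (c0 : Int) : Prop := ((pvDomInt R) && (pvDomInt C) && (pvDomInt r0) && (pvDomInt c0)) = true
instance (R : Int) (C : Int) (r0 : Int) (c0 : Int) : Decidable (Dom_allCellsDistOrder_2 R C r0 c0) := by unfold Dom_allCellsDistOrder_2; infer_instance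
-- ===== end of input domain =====

-- ===== PORT A =====
-- B replaces A's distance-bucket dict and distance scan by one build pass plus one stable sort (objective: simpler).
def allCellsDistOrder_2 (R : Int) (C : Int) (r0 : Int) (c0 : Int) : List (List Int) :=
  let maxDist := max r0 (R - 1 - r0) + max c0 (C - 1 - c0)
  let dist := fun (r1 c1 r2 c2 : Int) => |r1 - r2| + |c1 - c2|
  let bucket : PySem.Dict Int (List (List Int)) :=
    (PySem.List.pyRange 0 R 1).foldl (fun d i =>
      (PySem.List.pyRange 0 C 1).foldl (fun d j =>
        d.modify (dist i j r0 c0) [] (fun l => l ++ [[i, j]])) d)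
      PySem.Dict.empty
  (PySem.List.pyRange 0 (maxDist + 1) 1).foldl (fun ret i => ret ++ bucket.getD i []) []

-- ===== PORT B =====
def allCellsDistOrder_2_alt (R : Int) (C : Int) (r0 : Int) (c0 : Int) : List (List Int) :=
  let cells := (PySem.List.pyRange 0 R 1).flatMap (fun i =>
    (PySem.List.pyRange 0 C 1).map (fun j => [i, j]))
  PySem.List.sorted cells (fun c => |PySem.List.pyGetD c 0 0 - r0| + |PySem.List.pyGetD c 1 0 - c0|)

-- ===== PRECONDITION & SPEC =====
def Spec_allCellsDistOrder_2 (R : Int) (C : Int) (r0 : Int) (c0 : Int) (out : List (List Int)) : Prop := out = allCellsDistOrder_2_alt R C r0 c0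
instance (R : Int) (C : Int) (r0 : Int) (c0 : Int) (out : List (List Int)) : Decidable (Spec_allCellsDistOrder_2 R C r0 c0 out) := by unfold Spec_allCellsDistOrder_2; infer_instance

-- ===== CLAIM (what is proved, stated in full; the proofs are below) =====
def Claim_equal_allCellsDistOrder_2 : Prop := ∀ (R : Int) (C : Int) (r0 : Int) (c0 : Int), Dom_allCellsDistOrder_2 R C r0 c0 → Spec_allCellsDistOrder_2 R C r0 c0 (allCellsDistOrder_2 R C r0 c0)

-- ===== LEMMAS AND PROOFS =====

-- insertBy walks past a prefix it is not inserted into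
lemma insertBy_cons {α : Type} (before : α → α → Bool) (x y : α) (ys : List α) :
    PySem.List.insertBy before x (y :: ys)
      = if before x y then x :: y :: ys else y :: PySem.List.insertBy before x ys := rfl

lemma insertBy_append_skip {α : Type} (before : α → α → Bool) (x : α) (l t : List α)
    (h : ∀ y ∈ l, before x y = false) :
    PySem.List.insertBy before x (l ++ t) = l ++ PySem.List.insertBy before x t := by
  induction l with
  | nil => rfl
  | cons y l ih =>
    have hy : before x y = false := h y (by simp)
    simp [insertBy_cons, hy, ih (fun z hz => h z (by simp [hz]))]

-- insertBy puts x in front when it goes before everything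
lemma insertBy_front {α : Type} (before : α → α → Bool) (x : α) (t : List α)
    (h : ∀ y ∈ t, before x y = true) :
    PySem.List.insertBy before x t = x :: t := by
  cases t with
  | nil => rfl
  | cons y t => simp [insertBy_cons, h y (by simp)]

-- inserting x into a concatenation of strictly key-increasing blocks appends x to its own block
lemma block_insert {α : Type} (key : α → Int) (x : α) :
    ∀ (ds : List Int), ds.Pairwise (· < ·) → ∀ (B : Int → List α),
      (∀ d, ∀ y ∈ B d, key y = d) → key x ∈ ds →
      PySem.List.insertBy (fun a b => decide (key a < key b)) x (ds.flatMap B)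
        = ds.flatMap (fun d => B d ++ if key x = d then [x] else []) := by
  intro ds
  induction ds with
  | nil => intro _ B _ hx; simp at hx
  | cons d ds ih =>
    intro hpw B hB hx
    have hd : ∀ d' ∈ ds, d < d' := (List.pairwise_cons.1 hpw).1
    have hpw' := (List.pairwise_cons.1 hpw).2
    by_cases hxd : key x = d
    · have h1 : ∀ y ∈ B d, (fun a b => decide (key a < key b)) x y = false := by
        intro y hy; simp [hB d y hy, hxd]
      have h2 : ∀ y ∈ ds.flatMap B, (fun a b => decide (key a < key b)) x y = true := by
        intro y hy
        obtain ⟨d', hd', hyd'⟩ := List.mem_flatMap.1 hy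
        simp [hB d' y hyd', hxd, hd d' hd']
      have hnot : ∀ d' ∈ ds, (B d' ++ if key x = d' then [x] else []) = B d' := by
        intro d' hd'
        have : key x ≠ d' := by have := hd d' hd'; omega
        simp [this]
      rw [List.flatMap_cons, insertBy_append_skip _ _ _ _ h1, insertBy_front _ _ _ h2,
        List.flatMap_cons, if_pos hxd, List.flatMap_congr hnot]
      simp
    · have hxds : key x ∈ ds := by
        rcases List.mem_cons.1 hx with h | h
        · exact absurd h hxd
        · exact h
      have hgt : d < key x := hd _ hxds
      have h1 : ∀ y ∈ B d, (fun a b => decide (key a < key b)) x y = false := by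
        intro y hy; simp [hB d y hy]; omega
      rw [List.flatMap_cons, insertBy_append_skip _ _ _ _ h1, ih hpw' B hB hxds,
        List.flatMap_cons, if_neg hxd]
      simp

-- Python's stable sort is the concatenation of the key-classes, taken in increasing key order
lemma sorted_flatten {α : Type} (key : α → Int) (ds : List Int) (hpw : ds.Pairwise (· < ·)) :
    ∀ xs : List α, (∀ x ∈ xs, key x ∈ ds) →
      PySem.List.sorted xs key
        = ds.flatMap (fun d => xs.filter (fun x => decide (key x = d))) := by
  intro xs
  induction xs using List.reverseRecOn with
  | nil => simp [PySem.List.sorted]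
  | append_singleton xs x ih =>
    intro hmem
    have hxs : ∀ y ∈ xs, key y ∈ ds := fun y hy => hmem y (by simp [hy])
    have hx : key x ∈ ds := hmem x (by simp)
    have hBprop : ∀ d : Int, ∀ y ∈ xs.filter (fun x => decide (key x = d)), key y = d := by
      intro d y hy
      exact of_decide_eq_true (List.mem_filter.1 hy).2
    rw [PySem.List.sorted_eq_foldl_insertBy, List.foldl_append, List.foldl_cons, List.foldl_nil,
      ← PySem.List.sorted_eq_foldl_insertBy, ih hxs,
      block_insert key x ds hpw _ hBprop hx]
    apply List.flatMap_congr
    intro d _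
    simp [List.filter_append]
    split_ifs with h <;> simp [h]

-- a row/column nested loop is a single loop over the row-major pair list
lemma foldl_nested {δ : Type} (rs cs : List Int) (f : δ → Int → Int → δ) :
    ∀ (d0 : δ),
      rs.foldl (fun d i => cs.foldl (fun d j => f d i j) d) d0
        = (rs.flatMap (fun i => cs.map (fun j => (i, j)))).foldl (fun d p => f d p.1 p.2) d0 := by
  induction rs with
  | nil => intro d0; rfl
  | cons i rs ih =>
    intro d0
    rw [List.foldl_cons, List.flatMap_cons, List.foldl_append, List.foldl_map, ih]

lemma ports_eq (R C r0 c0 : Int) :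
    allCellsDistOrder_2 R C r0 c0 = allCellsDistOrder_2_alt R C r0 c0 := by
  unfold allCellsDistOrder_2 allCellsDistOrder_2_alt
  set rs := PySem.List.pyRange 0 R 1 with hrs
  set cs := PySem.List.pyRange 0 C 1 with hcs
  set pairs := rs.flatMap (fun i => cs.map (fun j => (i, j))) with hpairs
  set kd : Int × Int → Int := fun p => |p.1 - r0| + |p.2 - c0| with hkd
  set v : Int × Int → List Int := fun p => [p.1, p.2] with hv
  set maxDist := max r0 (R - 1 - r0) + max c0 (C - 1 - c0) with hmd
  set ds := PySem.List.pyRange 0 (maxDist + 1) 1 with hds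
  -- the bucket dict looks up to the filtered row-major list
  have hbucket : ∀ q : Int,
      (rs.foldl (fun d i => cs.foldl (fun d j =>
          d.modify (|i - r0| + |j - c0|) [] (fun l => l ++ [[i, j]])) d)
        (PySem.Dict.empty : PySem.Dict Int (List (List Int)))).getD q []
      = (pairs.filter (fun p => kd p == q)).map v := by
    intro q
    rw [foldl_nested rs cs
      (fun d i j => PySem.Dict.modify d (|i - r0| + |j - c0|) [] (fun l => l ++ [[i, j]]))]
    have h := PySem.Dict.getD_foldl_modify_append
      (l := pairs.map (fun p => (kd p, v p)))
      (d := (PySem.Dict.empty : PySem.Dict Int (List (List Int)))) (c := q)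
    rw [List.foldl_map] at h
    simpa [List.filter_map, Function.comp_def] using h
  have hkey : ∀ p : Int × Int,
      |PySem.List.pyGetD (v p) 0 0 - r0| + |PySem.List.pyGetD (v p) 1 0 - c0| = kd p := by
    intro p
    simp [hv, hkd, PySem.List.pyGetD, PySem.List.pyGet?, PySem.List.pyIdx?]
  have hcells : rs.flatMap (fun i => cs.map (fun j => ([i, j] : List Int))) = pairs.map v := by
    rw [hpairs, List.map_flatMap]
    simp [List.map_map, Function.comp_def, hv]
  have hmem : ∀ x ∈ pairs.map v,
      (|PySem.List.pyGetD x 0 0 - r0| + |PySem.List.pyGetD x 1 0 - c0|) ∈ ds := by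
    intro x hx
    obtain ⟨p, hp, rfl⟩ := List.mem_map.1 hx
    obtain ⟨i, hi, hpj⟩ := List.mem_flatMap.1 hp
    obtain ⟨j, hj, rfl⟩ := List.mem_map.1 hpj
    have hi' := PySem.List.mem_pyRange_one.1 hi
    have hj' := PySem.List.mem_pyRange_one.1 hj
    rw [hds, PySem.List.mem_pyRange_one, hkey (i, j), hkd]
    simp only
    rw [Int.abs_eq_natAbs, Int.abs_eq_natAbs]
    omega
  rw [PySem.List.foldl_append_eq_flatMap, hcells,
    sorted_flatten _ ds (PySem.List.pairwise_lt_pyRange_one 0 (maxDist + 1)) (pairs.map v) hmem,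
    List.nil_append]
  apply List.flatMap_congr
  intro q _
  rw [List.filter_map, hbucket q]
  have hpred : ∀ p ∈ pairs,
      (kd p == q)
        = ((fun x => decide (|PySem.List.pyGetD x 0 0 - r0| + |PySem.List.pyGetD x 1 0 - c0| = q)) ∘ v) p := by
    intro p _
    simp [Function.comp_def, hkey p, beq_eq_decide]
  rw [List.filter_congr hpred]

-- ===== VERDICT (by name: the statement is the Claim_ definition above) =====
theorem allCellsDistOrder_2_spec : Claim_equal_allCellsDistOrder_2 := by
  intro R C r0 c0 _
  unfold Spec_allCellsDistOrder_2
  exact ports_eq R C r0 c0
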